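-- pv_equiv track=rewrite | github.com/ashish5034/Python_ProblemSet | Problem28.py | evenCount
-- ===== SOURCE A (Python) =====
-- def evenCount(ino):
--     count = 0
--     while(ino != 0):
--         idigit = ino %10
--         if(idigit>3 and idigit<7):
--             count = count + 1
--         ino = ino //10
--     return count
-- ===== SOURCE B (Python) =====
-- def evenCount(ino):
--     return sum(1 for c in str(ino) if c in '456')
-- ===== Notes on version B (the rewrite author's own statement) =====
-- stated objective: idiomatic
-- what changed: B counts the characters '4','5','6' in str(ino) in one generator-sum pass instead of A's while-loop repeatedly taking the last decimal digit with mod and floor-division and maintaining a running quotient and counter.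
import Mathlib
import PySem

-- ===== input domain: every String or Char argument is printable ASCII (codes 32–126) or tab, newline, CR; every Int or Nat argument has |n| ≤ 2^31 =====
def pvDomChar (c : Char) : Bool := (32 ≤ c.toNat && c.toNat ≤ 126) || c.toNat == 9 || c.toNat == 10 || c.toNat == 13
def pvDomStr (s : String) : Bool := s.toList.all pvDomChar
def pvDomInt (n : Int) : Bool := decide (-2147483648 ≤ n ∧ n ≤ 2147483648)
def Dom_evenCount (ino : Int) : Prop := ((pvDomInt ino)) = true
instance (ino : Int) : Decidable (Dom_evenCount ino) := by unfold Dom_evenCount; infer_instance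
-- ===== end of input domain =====

-- B counts '4'/'5'/'6' characters of str(ino) in one pass instead of A's %10 // 10 loop (idiomatic rewrite; A diverges on negatives, excluded by Pre_).


-- ===== PORT A =====
-- A's while-loop; the loop state is the running quotient and the counter. On the
-- nonnegative inputs admitted by Pre_ Python's %10 and //10 coincide with Nat.mod/Nat.div,
-- so the loop runs on ino.toNat (Python A never terminates on negative ino; Pre_ excludes those).
def evenCountGo (n : Nat) (count : Int) : Int :=
  if n = 0 then count
  else
    let idigit : Int := PySem.Int.mod (n : Int) 10
    let count := if 3 < idigit ∧ idigit < 7 then count + 1 else count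
    evenCountGo (n / 10) count
decreasing_by exact Nat.div_lt_self (Nat.pos_of_ne_zero (by assumption)) (by norm_num)

def evenCount (ino : Int) : Int := evenCountGo ino.toNat 0

-- ===== PORT B =====
def evenCount_alt (ino : Int) : Int :=
  ((PySem.Int.toStr ino).toList.countP (fun c => c == '4' || c == '5' || c == '6') : Nat)

-- ===== PRECONDITION & SPEC =====
-- Pre_ excludes negative inputs: Python A loops forever there (-1 // 10 == -1), returning nothing.
def Pre_evenCount (ino : Int) : Prop := 0 ≤ ino
instance (ino : Int) : Decidable (Pre_evenCount ino) := by unfold Pre_evenCount; infer_instance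
def pvWitness_evenCount : Int := (456)

def Spec_evenCount (ino : Int) (out : Int) : Prop := out = evenCount_alt ino
instance (ino : Int) (out : Int) : Decidable (Spec_evenCount ino out) := by unfold Spec_evenCount; infer_instance

-- ===== CLAIM (what is proved, stated in full; the proofs are below) =====
def Claim_equal_evenCount : Prop := ∀ (ino : Int), Dom_evenCount ino → Pre_evenCount ino → Spec_evenCount ino (evenCount ino)

-- ===== LEMMAS AND PROOFS =====

-- the digit predicate on characters used by B
def pv456 (c : Char) : Bool := c == '4' || c == '5' || c == '6'

-- digit-count of a nonzero-or-single-digit number, matching the structure of toDigitsCore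
def pvGo (n : Nat) : Nat :=
  (if pv456 (Nat.digitChar (n % 10)) then 1 else 0) +
  (if h : n / 10 = 0 then 0 else pvGo (n / 10))
decreasing_by exact Nat.div_lt_self (by omega) (by norm_num)

lemma pvGo_zero : pvGo 0 = 0 := by
  unfold pvGo; decide

-- countP over toDigitsCore with enough fuel
lemma countP_toDigitsCore :
    ∀ (fuel n : Nat) (ds : List Char), n < fuel →
      (Nat.toDigitsCore 10 fuel n ds).countP pv456 = pvGo n + ds.countP pv456 := by
  intro fuel
  induction fuel with
  | zero => intro n ds h; omega
  | succ f ih =>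
    intro n ds h
    rw [Nat.toDigitsCore]
    by_cases h0 : n / 10 = 0
    · simp only [h0, if_true]
      rw [List.countP_cons]
      unfold pvGo
      simp only [h0, dif_pos]
      rcases hb : pv456 (Nat.digitChar (n % 10)) <;> simp [hb] <;> omega
    · simp only [h0, if_false]
      have hlt : n / 10 < f := by
        have : n / 10 < n := Nat.div_lt_self (by omega) (by norm_num)
        omega
      rw [ih (n / 10) _ hlt, List.countP_cons]
      conv_rhs => rw [pvGo]
      simp only [h0, dif_neg, not_false_iff]
      rcases hb : pv456 (Nat.digitChar (n % 10)) <;> simp [hb] <;> omega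

-- the digit condition of A matches the character condition of B, digit by digit
lemma cond_eq (n : Nat) :
    (3 < PySem.Int.mod (n : Int) 10 ∧ PySem.Int.mod (n : Int) 10 < 7) ↔
      pv456 (Nat.digitChar (n % 10)) = true := by
  have h10 : n % 10 < 10 := Nat.mod_lt _ (by norm_num)
  have hmod : PySem.Int.mod (n : Int) 10 = ((n % 10 : Nat) : Int) := by
    simp [PySem.Int.mod, Int.fmod_eq_emod]
  rw [hmod]
  interval_cases h : n % 10 <;> simp_all [pv456, Nat.digitChar] <;> decide

-- A's loop accumulates pvGo
lemma evenCountGo_eq : ∀ (n : Nat) (count : Int), evenCountGo n count = count + pvGo n := by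
  intro n
  induction n using Nat.strong_induction_on with
  | _ n ih =>
    intro count
    rw [evenCountGo]
    by_cases h0 : n = 0
    · simp [h0, pvGo_zero]
    · simp only [h0, if_false]
      have hlt : n / 10 < n := Nat.div_lt_self (by omega) (by norm_num)
      rw [ih _ hlt]
      conv_rhs => rw [pvGo]
      by_cases hc : 3 < PySem.Int.mod (n : Int) 10 ∧ PySem.Int.mod (n : Int) 10 < 7
      · have := (cond_eq n).mp hc
        simp only [hc, if_true, this]
        by_cases hq : n / 10 = 0 <;> simp [hq, pvGo_zero] <;> ring
      · have hb : pv456 (Nat.digitChar (n % 10)) = false := by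
          rcases hbb : pv456 (Nat.digitChar (n % 10))
          · rfl
          · exact absurd ((cond_eq n).mpr hbb) hc
        simp only [hc, if_false, hb]
        by_cases hq : n / 10 = 0 <;> simp [hq, pvGo_zero] <;> ring

-- ===== VERDICT (by name: the statement is the Claim_ definition above) =====
theorem evenCount_spec : Claim_equal_evenCount := by
  intro ino _ hpre
  have hpre' : 0 ≤ ino := hpre
  unfold Spec_evenCount evenCount evenCount_alt
  have hneg : ¬ ino < 0 := by omega
  have hs : (PySem.Int.toStr ino).toList = Nat.toDigits 10 ino.toNat := by
    rw [PySem.Int.toList_toStr]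
    simp [PySem.Int.toChars, hneg]
  rw [hs, evenCountGo_eq]
  show (0 : Int) + pvGo ino.toNat = ((Nat.toDigits 10 ino.toNat).countP pv456 : Nat)
  rw [Nat.toDigits, countP_toDigitsCore (ino.toNat + 1) ino.toNat [] (by omega)]
  simp
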